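-- pv_equiv track=rewrite | github.com/nualartlee/project_euler | problem217/solution4.py | two_digit_sum_generator
-- ===== SOURCE A (Python) =====
-- def two_digit_sum_generator(sum, m):
--     """
--     Return all the numbers (up to 2 digits) whose digit sum equals the given value.
--
--     :param sum: Value of the sum of the number's digits
--     :param m: Base number system
--     :return: The next number in increasing order
--     """
--     if sum >= m:
--         number = (sum - (m - 1)) * m + (m - 1)
--     else:
--         number = sum
--     for _ in range(m - abs(m - sum - 1)):
--         yield number
--         number += (m - 1)
-- ===== SOURCE B (Python) =====
-- def two_digit_sum_generator(sum, m):
--     """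
--     Yield all numbers of up to two digits in base m whose digit sum equals `sum`,
--     in increasing order. Builds the output back-to-front: walks the tens digit a
--     DOWN from its largest valid value min(m-1, sum), collecting a*m + (sum - a)
--     while the required units digit sum - a is still a valid digit, then reverses.
--     """
--     out = []
--     a = min(m - 1, sum)
--     while a >= 0 and sum - a <= m - 1:
--         out.append(a * m + (sum - a))
--         a -= 1
--     yield from reversed(out)
-- ===== Notes on version B (the rewrite author's own statement) =====
-- stated objective: alternative
-- what changed: B builds the output back-to-front: it walks the tens digit down from its largest valid value min(m-1,sum) while the required units digit sum-a stays a valid digit, computing each number a*m+(sum-a) from its digits, then reverses - no precomputed start value, count, or running accumulator as in A.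
import Mathlib
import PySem

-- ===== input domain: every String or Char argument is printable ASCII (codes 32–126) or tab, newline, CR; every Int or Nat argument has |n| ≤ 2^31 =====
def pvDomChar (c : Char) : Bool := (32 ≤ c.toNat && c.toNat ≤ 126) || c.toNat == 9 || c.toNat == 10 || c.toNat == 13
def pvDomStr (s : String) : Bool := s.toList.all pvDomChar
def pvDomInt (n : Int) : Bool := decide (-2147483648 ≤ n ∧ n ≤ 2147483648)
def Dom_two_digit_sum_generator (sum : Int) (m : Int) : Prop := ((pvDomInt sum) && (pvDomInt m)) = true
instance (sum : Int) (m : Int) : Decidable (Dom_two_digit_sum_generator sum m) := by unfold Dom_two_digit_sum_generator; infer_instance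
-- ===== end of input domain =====

-- B builds the output back-to-front: the tens digit walks DOWN from min(m-1,sum) while the
-- units digit sum-a stays valid, each number computed from its digits, then the list is
-- reversed — no precomputed start value, count, or running accumulator as in A.

-- ===== PORT A =====
def two_digit_sum_generator (sum : Int) (m : Int) : List Int :=
  let number := if sum ≥ m then (sum - (m - 1)) * m + (m - 1) else sum
  ((PySem.List.pyRange 0 (m - |m - sum - 1|) 1).foldl
    (fun (st : List Int × Int) _ => (st.1 ++ [st.2], st.2 + (m - 1)))
    ([], number)).1

-- ===== PORT B =====
-- while loop walking the tens digit a downward, collecting into out (termination: a decreases)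
def bLoop (sum : Int) (m : Int) (a : Int) (out : List Int) : List Int :=
  if _h : 0 ≤ a ∧ sum - a ≤ m - 1 then
    bLoop sum m (a - 1) (out ++ [a * m + (sum - a)])
  else out
termination_by (a + 1).toNat
decreasing_by omega

def two_digit_sum_generator_alt (sum : Int) (m : Int) : List Int :=
  (bLoop sum m (min (m - 1) sum) []).reverse

-- ===== PRECONDITION & SPEC =====
def Spec_two_digit_sum_generator (sum : Int) (m : Int) (out : List Int) : Prop := out = two_digit_sum_generator_alt sum m
instance (sum : Int) (m : Int) (out : List Int) : Decidable (Spec_two_digit_sum_generator sum m out) := by unfold Spec_two_digit_sum_generator; infer_instance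

-- ===== CLAIM (what is proved, stated in full; the proofs are below) =====
def Claim_equal_two_digit_sum_generator : Prop := ∀ (sum : Int) (m : Int), Dom_two_digit_sum_generator sum m → Spec_two_digit_sum_generator sum m (two_digit_sum_generator sum m)

-- ===== LEMMAS AND PROOFS =====

-- A's loop appends number, number+d, number+2d, …
lemma foldA (d : Int) (l : List Int) (acc : List Int) (num : Int) :
    ((l.foldl (fun (st : List Int × Int) _ => (st.1 ++ [st.2], st.2 + d)) (acc, num)).1)
      = acc ++ (List.range l.length).map (fun (k : Nat) => num + (k : Int) * d) := by
  induction l generalizing acc num with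
  | nil => simp
  | cons x xs ih =>
      rw [List.foldl_cons, ih, List.length_cons, List.range_succ_eq_map,
        List.map_cons, List.map_map, List.append_assoc]
      congr 1
      simp only [Nat.cast_zero, zero_mul, add_zero, List.singleton_append, List.cons.injEq,
        true_and]
      apply List.map_congr_left
      intro k _
      simp only [Function.comp_apply, Nat.succ_eq_add_one]
      push_cast
      ring

-- B's descending loop collects the clipped digit range in reverse
lemma bLoop_eq (sum m : Int) :
    ∀ (n : Nat) (a : Int) (out : List Int), (a + 1).toNat = n →
      bLoop sum m a out
        = out ++ ((PySem.List.pyRange (max 0 (sum - (m - 1))) (a + 1) 1).map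
            (fun x => x * m + (sum - x))).reverse := by
  intro n
  induction n with
  | zero =>
      intro a out h
      rw [bLoop, dif_neg (by omega), PySem.List.pyRange_one_eq_nil (by omega)]
      simp
  | succ n ih =>
      intro a out h
      by_cases hc : 0 ≤ a ∧ sum - a ≤ m - 1
      · rw [bLoop, dif_pos hc, ih (a - 1) _ (by omega)]
        rw [show a - 1 + 1 = a by ring,
          PySem.List.pyRange_one_succ_right (max_le hc.1 (by omega)), List.map_append]
        simp [List.reverse_append, List.append_assoc]
      · rw [bLoop, dif_neg hc, PySem.List.pyRange_one_eq_nil (by omega)]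
        simp

-- B equals the closed-form clipped digit range, mapped in increasing order
lemma altB (sum m : Int) :
    two_digit_sum_generator_alt sum m
      = (PySem.List.pyRange (max 0 (sum - (m - 1))) (min (m - 1) sum + 1) 1).map
          (fun a => a * m + (sum - a)) := by
  unfold two_digit_sum_generator_alt
  rw [bLoop_eq sum m (min (m - 1) sum + 1).toNat (min (m - 1) sum) [] rfl]
  simp

theorem two_digit_sum_generator_spec : Claim_equal_two_digit_sum_generator := by
  intro sum m _
  unfold Spec_two_digit_sum_generator two_digit_sum_generator
  rw [altB]
  simp only [foldA, PySem.List.pyRange_one, List.nil_append, List.length_map,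
    List.length_range, List.map_map]
  by_cases hpos : 0 < m - |m - sum - 1|
  · have hn : (m - |m - sum - 1| - 0).toNat
        = (min (m - 1) sum + 1 - max 0 (sum - (m - 1))).toNat := by
      rcases abs_cases (m - sum - 1) with ⟨h1, h2⟩ | ⟨h1, h2⟩ <;> omega
    rw [hn]
    apply List.map_congr_left
    intro k _
    have hb : (0:Int) ≤ sum ∧ sum ≤ 2 * m - 2 := by
      rcases abs_cases (m - sum - 1) with ⟨h1, h2⟩ | ⟨h1, h2⟩ <;> constructor <;> omega
    by_cases hs : sum ≥ m
    · have hlo : max 0 (sum - (m - 1)) = sum - (m - 1) := by omega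
      simp only [Function.comp_apply, if_pos hs, hlo]
      ring
    · have hlo : max 0 (sum - (m - 1)) = 0 := by omega
      simp only [Function.comp_apply, if_neg hs, hlo]
      ring
  · have h1 : (m - |m - sum - 1| - 0).toNat = 0 := by omega
    have h2 : (min (m - 1) sum + 1 - max 0 (sum - (m - 1))).toNat = 0 := by
      rcases abs_cases (m - sum - 1) with ⟨ha, hb⟩ | ⟨ha, hb⟩ <;> omega
    rw [h1, h2]
    simp
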